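-- pv_equiv track=rewrite | github.com/Haserjian/assay | src/assay/reviewer_packet_verify.py | _split_evidence_refs
-- ===== SOURCE A (Python) =====
-- from typing import Any, Dict, List, Optional, Tuple
--
-- def _split_evidence_refs(cell: str) -> List[str]:
--     if not cell or cell == "None":
--         return []
--     refs: List[str] = []
--     for segment in cell.split(";"):
--         for item in segment.split(" and "):
--             ref = item.strip().strip("`")
--             if ref:
--                 refs.append(ref)
--     return refs
-- ===== SOURCE B (Python) =====
-- from typing import List
--
-- def _split_evidence_refs(cell: str) -> List[str]:
--     if not cell or cell == "None":
--         return []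
--     tokens: List[str] = []
--     cur: List[str] = []
--     i, n = 0, len(cell)
--     while i < n:
--         if cell[i] == ";":
--             tokens.append("".join(cur)); cur = []; i += 1
--         elif cell.startswith(" and ", i):
--             tokens.append("".join(cur)); cur = []; i += 5
--         else:
--             cur.append(cell[i]); i += 1
--     tokens.append("".join(cur))
--     return [r for t in tokens for r in (t.strip().strip("`"),) if r]
-- ===== Notes on version B (the rewrite author's own statement) =====
-- stated objective: alternative
-- what changed: Replaces A's nested split(';') / split(' and ') loops with a single left-to-right scan that tokenizes the string in one pass, emitting a token at each ';' or ' and ' delimiter, then strips and filters the tokens in one comprehension.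
import Mathlib
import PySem

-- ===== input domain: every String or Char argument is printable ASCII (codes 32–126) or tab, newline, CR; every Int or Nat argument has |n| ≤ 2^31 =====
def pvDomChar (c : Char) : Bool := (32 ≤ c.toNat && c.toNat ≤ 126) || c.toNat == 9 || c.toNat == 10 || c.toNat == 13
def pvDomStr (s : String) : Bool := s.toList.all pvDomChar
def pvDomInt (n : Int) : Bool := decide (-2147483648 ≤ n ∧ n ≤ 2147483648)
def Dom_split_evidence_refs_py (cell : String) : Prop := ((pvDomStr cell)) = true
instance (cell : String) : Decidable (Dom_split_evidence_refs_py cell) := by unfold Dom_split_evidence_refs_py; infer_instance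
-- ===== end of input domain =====

-- B replaces A's nested split(';') / split(' and ') loops by a single left-to-right scan that
-- tokenizes at ';' or ' and ' in one pass (objective: alternative/idiomatic single-pass tokenizer).
-- Both ports work on List Char (PySem.Chars is the exact string semantics) and map String.ofList at the end.

-- ===== PORT A =====
-- literal port of A: nested foldl over cell.split(";") and segment.split(" and "),
-- ref = item.strip().strip("`"), appended when nonempty
def split_evidence_refs_py (cell : String) : List String :=
  if cell = "" ∨ cell = "None" then []
  else
    (((PySem.Chars.splitOn cell.toList ";".toList).foldl (fun refs segment =>
        (PySem.Chars.splitOn segment " and ".toList).foldl (fun refs item =>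
          let ref := PySem.Chars.stripChars (PySem.Chars.strip item) ['`']
          if ref ≠ [] then refs ++ [ref] else refs) refs) ([] : List (List Char))).map String.ofList)

-- ===== PORT B =====
-- single-pass tokenizer: emit a token at ';' (consume 1) or at " and " (consume 5); exact port of Source B's scan loop
def pvTok : List Char → List (List Char)
  | [] => [[]]
  | c :: rest =>
    if c = ';' then [] :: pvTok rest
    else if (" and ".toList).isPrefixOf (c :: rest) then [] :: pvTok ((c :: rest).drop 5)
    else (pvTok rest).modifyHead (c :: ·)
termination_by l => l.length
decreasing_by all_goals (simp; try omega)

def split_evidence_refs_py_alt (cell : String) : List String :=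
  if cell = "" ∨ cell = "None" then []
  else
    ((pvTok cell.toList).filterMap (fun t =>
      let r := PySem.Chars.stripChars (PySem.Chars.strip t) ['`']
      if r = [] then none else some r)).map String.ofList

-- ===== PRECONDITION & SPEC =====
def Spec_split_evidence_refs_py (cell : String) (out : List String) : Prop := out = split_evidence_refs_py_alt cell
instance (cell : String) (out : List String) : Decidable (Spec_split_evidence_refs_py cell out) := by unfold Spec_split_evidence_refs_py; infer_instance

-- ===== CLAIM (what is proved, stated in full; the proofs are below) =====
def Claim_equal_split_evidence_refs_py : Prop := ∀ (cell : String), Dom_split_evidence_refs_py cell → Spec_split_evidence_refs_py cell (split_evidence_refs_py cell)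

-- ===== LEMMAS AND PROOFS =====

-- a direct-recursion reformulation of PySem.Chars.splitOn (nonempty separator s0 :: sr)
def pvSp (s0 : Char) (sr : List Char) : List Char → List (List Char)
  | [] => [[]]
  | c :: rest =>
    if (s0 :: sr).isPrefixOf (c :: rest) then [] :: pvSp s0 sr ((c :: rest).drop (sr.length + 1))
    else (pvSp s0 sr rest).modifyHead (c :: ·)
termination_by l => l.length
decreasing_by all_goals simp

theorem pvSp_ne_nil (s0 : Char) (sr l : List Char) : pvSp s0 sr l ≠ [] := by
  cases l with
  | nil => simp [pvSp]
  | cons c rest =>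
    rw [pvSp]
    split
    · simp
    · have := pvSp_ne_nil s0 sr rest
      rcases h : pvSp s0 sr rest with _ | ⟨a, b⟩ <;> simp_all
termination_by l.length
decreasing_by simp

theorem pvGo_spec (s0 : Char) (sr : List Char) (fuel : Nat) (l cur : List Char)
    (acc : List (List Char)) (hf : l.length < fuel) :
    PySem.Chars.splitOn.go (s0 :: sr) fuel l cur acc
      = acc.reverse ++ (pvSp s0 sr l).modifyHead (cur.reverse ++ ·) := by
  induction fuel generalizing l cur acc with
  | zero => omega
  | succ f ih =>
    rcases l with _ | ⟨c, rest⟩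
    · rw [PySem.Chars.splitOn.go, pvSp]
      simp
      omega
    · rw [PySem.Chars.splitOn.go, pvSp]
      by_cases hp : (s0 :: sr).isPrefixOf (c :: rest)
      · have hlen : sr.length ≤ rest.length := by
          have := (List.isPrefixOf_iff_prefix.mp hp).length_le
          simpa using this
        rw [if_pos hp]
        rw [ih _ _ _ (by simp at hf ⊢; omega)]
        rcases hsp : pvSp s0 sr ((c :: rest).drop (sr.length + 1)) with _ | ⟨h1, t1⟩
        · exact absurd hsp (pvSp_ne_nil s0 sr _)
        · simp at hp
          simp only [List.drop_succ_cons] at hsp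
          obtain ⟨rfl, hp2⟩ := hp
          simp [hsp, hp2]
      · rw [if_neg hp]
        rw [ih _ _ _ (by simp at hf ⊢; omega)]
        rcases hsp : pvSp s0 sr rest with _ | ⟨h1, t1⟩
        · exact absurd hsp (pvSp_ne_nil s0 sr _)
        · simp at hp
          have hnp : ¬(s0 = c ∧ sr <+: rest) := fun h => hp h.1 h.2
          simp [hnp]

theorem splitOn_eq_pvSp (s0 : Char) (sr l : List Char) :
    PySem.Chars.splitOn l (s0 :: sr) = pvSp s0 sr l := by
  rw [PySem.Chars.splitOn, pvGo_spec s0 sr _ _ _ _ (by omega)]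
  rcases hsp : pvSp s0 sr l with _ | ⟨h1, t1⟩
  · exact absurd hsp (pvSp_ne_nil s0 sr _)
  · simp

theorem pvSp_head_prefix (s0 : Char) (sr : List Char) :
    ∀ (n : Nat) (l h1 : List Char) (t1 : List (List Char)),
      l.length ≤ n → pvSp s0 sr l = h1 :: t1 → h1 <+: l := by
  intro n
  induction n with
  | zero =>
    intro l h1 t1 hl h
    have hnil : l = [] := by cases l <;> simp_all
    subst hnil
    rw [pvSp] at h
    obtain ⟨rfl, -⟩ := List.cons.inj h
    exact List.nil_prefix
  | succ n ih =>
    intro l h1 t1 hl h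
    cases l with
    | nil =>
      rw [pvSp] at h
      obtain ⟨rfl, -⟩ := List.cons.inj h
      exact List.nil_prefix
    | cons c rest =>
      rw [pvSp] at h
      split at h
      · obtain ⟨rfl, -⟩ := List.cons.inj h
        exact List.nil_prefix
      · rcases hsp : pvSp s0 sr rest with _ | ⟨h', t'⟩
        · exact absurd hsp (pvSp_ne_nil s0 sr rest)
        · rw [hsp] at h
          simp only [List.modifyHead] at h
          obtain ⟨rfl, -⟩ := List.cons.inj h
          have hpre := ih rest h' t' (by simp at hl; omega) hsp
          exact List.cons_prefix_cons.mpr ⟨rfl, hpre⟩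

-- single-character separator d, no occurrence of d in p: splitting p ++ cs extends the first piece
theorem pvSp1_append (d : Char) (p cs : List Char) (hp : d ∉ p) :
    pvSp d [] (p ++ cs) = (pvSp d [] cs).modifyHead (p ++ ·) := by
  induction p with
  | nil =>
    rcases hsp : pvSp d [] cs with _ | ⟨h1, t1⟩
    · exact absurd hsp (pvSp_ne_nil d [] cs)
    · simp [hsp]
  | cons a p ihp =>
    have ha : d ≠ a := fun h => hp (by simp [h])
    have hp' : d ∉ p := fun h => hp (by simp [h])
    simp only [List.cons_append]
    rw [pvSp]
    rw [if_neg (by simp [List.isPrefixOf]; intro h; exact absurd h ha)]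
    rw [ihp hp']
    rcases hsp : pvSp d [] cs with _ | ⟨h1, t1⟩
    · exact absurd hsp (pvSp_ne_nil d [] cs)
    · simp

theorem pvTok_eq_flatMap :
    ∀ (n : Nat) (cs : List Char), cs.length ≤ n →
      pvTok cs = (pvSp ';' [] cs).flatMap (fun seg => pvSp ' ' "and ".toList seg) := by
  intro n
  induction n with
  | zero =>
    intro cs hl
    have hnil : cs = [] := by cases cs <;> simp_all
    subst hnil
    simp [pvTok, pvSp]
  | succ n ih =>
    intro cs hl
    cases cs with
    | nil => simp [pvTok, pvSp]
    | cons c rest =>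
      rw [pvTok]
      by_cases hc : c = ';'
      · subst hc
        rw [if_pos rfl]
        rw [pvSp, if_pos (by simp [List.isPrefixOf])]
        simp only [List.length_nil, Nat.zero_add, List.drop_succ_cons, List.drop_zero]
        rw [ih rest (by simp at hl; omega)]
        simp [pvSp]
      · rw [if_neg hc]
        by_cases hand : (" and ".toList).isPrefixOf (c :: rest)
        · rw [if_pos hand]
          have hsplit : c :: rest = " and ".toList ++ (c :: rest).drop 5 := by
            have := List.isPrefixOf_iff_prefix.mp hand
            obtain ⟨t, ht⟩ := this
            rw [← ht]
            simp
          have hdl : ((c :: rest).drop 5).length ≤ n := by simp at hl ⊢; omega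
          conv_rhs => rw [hsplit, pvSp1_append ';' (" and ".toList) _ (by decide)]
          rcases hsp : pvSp ';' [] ((c :: rest).drop 5) with _ | ⟨h1, t1⟩
          · exact absurd hsp (pvSp_ne_nil ';' [] _)
          · simp only [List.modifyHead_cons]
            rw [List.flatMap_cons]
            have hc5 : " and ".toList ++ h1 = ' ' :: ("and ".toList ++ h1) := rfl
            rw [hc5, pvSp, if_pos (by rw [List.isPrefixOf_iff_prefix]; exact ⟨h1, by simp⟩)]
            have hdrop : (' ' :: ("and ".toList ++ h1)).drop ("and ".toList.length + 1) = h1 := by simp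
            rw [hdrop]
            rw [ih _ hdl, hsp, List.flatMap_cons]
            simp
        · rw [if_neg hand]
          rw [pvSp, if_neg (by simp [List.isPrefixOf]; intro h; exact hc h.symm)]
          rcases hsp : pvSp ';' [] rest with _ | ⟨h1, t1⟩
          · exact absurd hsp (pvSp_ne_nil ';' [] rest)
          · simp only [List.modifyHead_cons]
            rw [List.flatMap_cons]
            have hpre : h1 <+: rest := pvSp_head_prefix ';' [] rest.length rest h1 t1 le_rfl hsp
            have hnand : ¬ (" and ".toList).isPrefixOf (c :: h1) := by
              intro h
              exact hand (List.isPrefixOf_iff_prefix.mpr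
                ((List.isPrefixOf_iff_prefix.mp h).trans (List.cons_prefix_cons.mpr ⟨rfl, hpre⟩)))
            rw [pvSp, if_neg (by intro h; exact hnand (by simpa [List.isPrefixOf_iff_prefix] using h))]
            rcases hsp2 : pvSp ' ' "and ".toList h1 with _ | ⟨g1, gt⟩
            · exact absurd hsp2 (pvSp_ne_nil ' ' _ h1)
            · rw [ih rest (by simp at hl; omega), hsp, List.flatMap_cons, hsp2]
              simp

-- the value kept per token: strip whitespace, then backticks; none when empty
def pvRef (t : List Char) : Option (List Char) :=
  let r := PySem.Chars.stripChars (PySem.Chars.strip t) ['`']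
  if r = [] then none else some r

theorem pvInner_foldl (items refs : List (List Char)) :
    items.foldl (fun refs item =>
      let ref := PySem.Chars.stripChars (PySem.Chars.strip item) ['`']
      if ref ≠ [] then refs ++ [ref] else refs) refs
    = refs ++ items.filterMap pvRef := by
  induction items generalizing refs with
  | nil => simp
  | cons a l ihl =>
    simp only [List.foldl_cons, List.filterMap_cons]
    rw [ihl]
    by_cases h : PySem.Chars.stripChars (PySem.Chars.strip a) ['`'] = [] <;>
      simp [pvRef, h]

theorem pvOuter_foldl (segs : List (List Char)) (refs : List (List Char)) :
    segs.foldl (fun refs seg =>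
      (pvSp ' ' "and ".toList seg).foldl (fun refs item =>
        let ref := PySem.Chars.stripChars (PySem.Chars.strip item) ['`']
        if ref ≠ [] then refs ++ [ref] else refs) refs) refs
    = refs ++ (segs.flatMap (fun seg => pvSp ' ' "and ".toList seg)).filterMap pvRef := by
  induction segs generalizing refs with
  | nil => simp
  | cons s l ihl =>
    simp only [List.foldl_cons, List.flatMap_cons, List.filterMap_append]
    rw [pvInner_foldl, ihl, List.append_assoc]

-- ===== VERDICT (by name: the statement is the Claim_ definition above) =====
theorem split_evidence_refs_py_spec : Claim_equal_split_evidence_refs_py := by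
  intro cell _
  unfold Spec_split_evidence_refs_py split_evidence_refs_py split_evidence_refs_py_alt
  by_cases hg : cell = "" ∨ cell = "None"
  · simp [hg]
  · rw [if_neg hg, if_neg hg]
    have h1 : ";".toList = [';'] := rfl
    have h2 : " and ".toList = ' ' :: "and ".toList := rfl
    rw [h1, splitOn_eq_pvSp ';' [] cell.toList]
    have hrw : ∀ seg : List Char, PySem.Chars.splitOn seg " and ".toList = pvSp ' ' "and ".toList seg := by
      intro seg
      rw [h2, splitOn_eq_pvSp]
    simp only [hrw]
    rw [pvOuter_foldl, pvTok_eq_flatMap cell.toList.length cell.toList le_rfl]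
    simp [pvRef]
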